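-- pv_equiv track=rewrite | github.com/afaucon/obs-postprocessing | main.py | seconds_to_timestamp_str
-- ===== SOURCE A (Python) =====
-- def seconds_to_timestamp_str(seconds):
--     seconds = int(seconds)
--     ret_val = ''
--     for i in range(3):
--         new_number = seconds // [3600, 60, 1][i]
--         ret_val += f'{new_number:02}' + ':'
--         seconds -= new_number * [3600, 60, 1][i]
--     return ret_val[:-1]
-- ===== SOURCE B (Python) =====
-- def seconds_to_timestamp_str(seconds):
--     t = int(seconds)
--     fields = []
--     for _ in range(2):
--         t, r = divmod(t, 60)
--         fields.append(r)
--     fields.append(t)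
--     return ':'.join(str(f).zfill(2) for f in reversed(fields))
-- ===== Notes on version B (the rewrite author's own statement) =====
-- stated objective: alternative
-- what changed: Instead of A's most-significant-first loop over the divisor table [3600,60,1] with a running remainder, string concatenation and a trailing-colon trim, B extracts base-60 digits least-significant-first (two divmods by 60 collected back-to-front), then reverses the field list and ':'-joins the zero-padded fields.
import Mathlib
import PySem

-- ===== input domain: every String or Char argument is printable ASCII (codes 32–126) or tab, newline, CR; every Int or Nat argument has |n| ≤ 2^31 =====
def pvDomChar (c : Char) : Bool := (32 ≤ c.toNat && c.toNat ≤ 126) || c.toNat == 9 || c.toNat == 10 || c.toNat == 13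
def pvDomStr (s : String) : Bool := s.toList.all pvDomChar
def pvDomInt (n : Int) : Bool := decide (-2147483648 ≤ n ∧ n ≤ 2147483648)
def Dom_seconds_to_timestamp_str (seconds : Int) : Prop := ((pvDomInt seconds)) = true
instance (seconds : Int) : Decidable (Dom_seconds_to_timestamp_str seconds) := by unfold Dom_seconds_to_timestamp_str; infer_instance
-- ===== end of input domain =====

-- B replaces A's most-significant-first loop over the divisor table [3600, 60, 1] (running remainder,
-- string concatenation, trailing-colon trim) by least-significant-first base-60 digit extraction
-- (two divmods by 60 collected back-to-front, then reverse and ':'.join); objective: alternative.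

-- ===== PORT A =====
def seconds_to_timestamp_str (seconds : Int) : String :=
  -- ret_val = ''; for i in range(3): …; return ret_val[:-1]
  -- f'{n:02}' on an int equals str(n).zfill(2) (zero-pad to width 2, sign in front): exact
  let st := (PySem.List.pyRange 0 3 1).foldl (fun (st : Int × String) i =>
    -- i ∈ {0,1,2} so [3600,60,1][i] never raises; .getD 0 only totalises the lookup
    let d := (PySem.List.pyGet? ([3600, 60, 1] : List Int) i).getD 0
    let newNumber := PySem.Int.floordiv st.1 d
    (st.1 - newNumber * d, st.2 ++ PySem.Str.zfill (PySem.Int.toStr newNumber) 2 ++ ":")) (seconds, "")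
  PySem.Str.slice st.2 none (some (-1))

-- ===== PORT B =====
def seconds_to_timestamp_str_alt (seconds : Int) : String :=
  -- t = int(seconds); fields = []; for _ in range(2): t, r = divmod(t, 60); fields.append(r)
  -- divisor is the nonzero literal 60, so divmod? is always some
  let st := (PySem.List.pyRange 0 2 1).foldl (fun (st : Int × List Int) _ =>
    let qr := (PySem.Int.divmod? st.1 60).getD (0, 0)
    (qr.1, st.2 ++ [qr.2])) (seconds, [])
  -- fields.append(t); return ':'.join(str(f).zfill(2) for f in reversed(fields))
  PySem.Str.join ":" ((st.2 ++ [st.1]).reverse.map (fun f => PySem.Str.zfill (PySem.Int.toStr f) 2))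

-- ===== PRECONDITION & SPEC =====
def Spec_seconds_to_timestamp_str (seconds : Int) (out : String) : Prop := out = seconds_to_timestamp_str_alt seconds
instance (seconds : Int) (out : String) : Decidable (Spec_seconds_to_timestamp_str seconds out) := by unfold Spec_seconds_to_timestamp_str; infer_instance

-- ===== CLAIM =====
def Claim_equal_seconds_to_timestamp_str : Prop := ∀ (seconds : Int), Dom_seconds_to_timestamp_str seconds → Spec_seconds_to_timestamp_str seconds (seconds_to_timestamp_str seconds)

-- ===== LEMMAS AND PROOFS =====

-- dropping A's trailing ':' from 'hh:mm:ss:' leaves B's join 'hh:mm:ss' (char-list level)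
theorem dropLast_colon (b c : List Char) :
    (':' :: (b ++ ':' :: (c ++ [':']))).dropLast = ':' :: (b ++ ':' :: c) := by
  have h : (':' :: (b ++ ':' :: (c ++ [':']))) = (':' :: (b ++ ':' :: c)) ++ [':'] := by simp
  rw [h, List.dropLast_concat]

-- ':'.join of exactly three pieces, unfolded
theorem join_three (a b c : List Char) :
    PySem.Chars.join [':'] [a, b, c] = a ++ ':' :: (b ++ ':' :: c) := by
  simp [PySem.Chars.join_cons_cons, PySem.Chars.join_singleton]

-- ===== VERDICT =====
theorem seconds_to_timestamp_str_spec : Claim_equal_seconds_to_timestamp_str := by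
  intro t _
  unfold Spec_seconds_to_timestamp_str seconds_to_timestamp_str seconds_to_timestamp_str_alt
  have hrA : PySem.List.pyRange 0 3 1 = [0, 1, 2] := by decide
  have hrB : PySem.List.pyRange 0 2 1 = [0, 1] := by decide
  rw [hrA, hrB]
  simp only [List.foldl]
  have g0 : (PySem.List.pyGet? ([3600, 60, 1] : List Int) 0).getD 0 = 3600 := by decide
  have g1 : (PySem.List.pyGet? ([3600, 60, 1] : List Int) 1).getD 0 = 60 := by decide
  have g2 : (PySem.List.pyGet? ([3600, 60, 1] : List Int) 2).getD 0 = 1 := by decide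
  rw [g0, g1, g2]
  have hdm (y : Int) : (PySem.Int.divmod? y 60).getD (0, 0) = (PySem.Int.floordiv y 60, PySem.Int.mod y 60) := by
    simp [PySem.Int.divmod?, PySem.Int.floordiv, PySem.Int.mod]
  rw [hdm, hdm]
  have hfd1 (y : Int) : PySem.Int.floordiv y 1 = y := by simp [PySem.Int.floordiv]
  -- arithmetic: the least-significant-first digits equal A's running-remainder fields
  have e1 : PySem.Int.floordiv (PySem.Int.floordiv t 60) 60 = PySem.Int.floordiv t 3600 := by
    have h1 := PySem.Int.floordiv_mul_add_mod t 60
    have h2 := PySem.Int.floordiv_mul_add_mod (PySem.Int.floordiv t 60) 60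
    have h3 := PySem.Int.floordiv_mul_add_mod t 3600
    have b1 := PySem.Int.mod_nonneg t (b := 60) (by norm_num)
    have b1' := PySem.Int.mod_lt t (b := 60) (by norm_num)
    have b2 := PySem.Int.mod_nonneg (PySem.Int.floordiv t 60) (b := 60) (by norm_num)
    have b2' := PySem.Int.mod_lt (PySem.Int.floordiv t 60) (b := 60) (by norm_num)
    have b3 := PySem.Int.mod_nonneg t (b := 3600) (by norm_num)
    have b3' := PySem.Int.mod_lt t (b := 3600) (by norm_num)
    omega
  have e2 : PySem.Int.mod (PySem.Int.floordiv t 60) 60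
      = PySem.Int.floordiv (t - PySem.Int.floordiv t 3600 * 3600) 60 := by
    have h1 := PySem.Int.floordiv_mul_add_mod t 60
    have h2 := PySem.Int.floordiv_mul_add_mod (PySem.Int.floordiv t 60) 60
    have h3 := PySem.Int.floordiv_mul_add_mod t 3600
    have h4 := PySem.Int.floordiv_mul_add_mod (t - PySem.Int.floordiv t 3600 * 3600) 60
    have b1 := PySem.Int.mod_nonneg t (b := 60) (by norm_num)
    have b1' := PySem.Int.mod_lt t (b := 60) (by norm_num)
    have b2 := PySem.Int.mod_nonneg (PySem.Int.floordiv t 60) (b := 60) (by norm_num)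
    have b2' := PySem.Int.mod_lt (PySem.Int.floordiv t 60) (b := 60) (by norm_num)
    have b3 := PySem.Int.mod_nonneg t (b := 3600) (by norm_num)
    have b3' := PySem.Int.mod_lt t (b := 3600) (by norm_num)
    have b4 := PySem.Int.mod_nonneg (t - PySem.Int.floordiv t 3600 * 3600) (b := 60) (by norm_num)
    have b4' := PySem.Int.mod_lt (t - PySem.Int.floordiv t 3600 * 3600) (b := 60) (by norm_num)
    omega
  have e3 : PySem.Int.mod t 60
      = t - PySem.Int.floordiv t 3600 * 3600
        - PySem.Int.floordiv (t - PySem.Int.floordiv t 3600 * 3600) 60 * 60 := by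
    have h1 := PySem.Int.floordiv_mul_add_mod t 60
    have h3 := PySem.Int.floordiv_mul_add_mod t 3600
    have h4 := PySem.Int.floordiv_mul_add_mod (t - PySem.Int.floordiv t 3600 * 3600) 60
    have b1 := PySem.Int.mod_nonneg t (b := 60) (by norm_num)
    have b1' := PySem.Int.mod_lt t (b := 60) (by norm_num)
    have b3 := PySem.Int.mod_nonneg t (b := 3600) (by norm_num)
    have b3' := PySem.Int.mod_lt t (b := 3600) (by norm_num)
    have b4 := PySem.Int.mod_nonneg (t - PySem.Int.floordiv t 3600 * 3600) (b := 60) (by norm_num)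
    have b4' := PySem.Int.mod_lt (t - PySem.Int.floordiv t 3600 * 3600) (b := 60) (by norm_num)
    omega
  simp only [hfd1, e1, e2, e3]
  apply String.toList_injective
  simp [PySem.List.slice_to_neg_one, join_three, dropLast_colon]
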